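-- pv_equiv track=rewrite | github.com/QDucasse/sdve-beem-benchmark | stats.py | extract_decl_and_proc
-- ===== SOURCE A (Python) =====
-- def extract_decl_and_proc(content):
--     '''
--     Extract the different regions from the contents of the file
--     '''
--     # Split the content on every "process" encouter
--     process_indexes = (i for i,v in enumerate(content) if "process" in v)
--     old_proc_ind  = 0
--     next_proc_ind = next(process_indexes, 0)
--
--     # Global declarations
--     globs = content[:next_proc_ind]
--
--     # Processes
--     processes = []
--     # Step 0
--     old_proc_ind = next_proc_ind
--     next_proc_ind = next(process_indexes, 0)
--     # Run through all the others
--     while(next_proc_ind != 0):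
--         processes.append(content[old_proc_ind:next_proc_ind])
--         old_proc_ind = next_proc_ind
--         next_proc_ind = next(process_indexes, 0)
--     return globs, processes
-- ===== SOURCE B (Python) =====
-- def extract_decl_and_proc(content):
--     '''
--     Extract the different regions from the contents of the file
--     '''
--     globs, processes, current, seen = [], [], [], False
--     for line in content:
--         if "process" in line:
--             if seen:
--                 processes.append(current)
--             else:
--                 globs = current
--                 seen = True
--             current = [line]
--         else:
--             current.append(line)
--     # the trailing region (after the last "process" line) is discarded,
--     # matching the original behaviour
--     return globs, processes
-- ===== Notes on version B (the rewrite author's own statement) =====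
-- stated objective: alternative
-- what changed: Replaces A's two-phase index approach (enumerate the positions of 'process' lines, then slice the list between consecutive positions) by a single left-to-right pass that maintains the current region and a seen-flag, flushing the region at each 'process' line and discarding the trailing one.
import Mathlib
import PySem

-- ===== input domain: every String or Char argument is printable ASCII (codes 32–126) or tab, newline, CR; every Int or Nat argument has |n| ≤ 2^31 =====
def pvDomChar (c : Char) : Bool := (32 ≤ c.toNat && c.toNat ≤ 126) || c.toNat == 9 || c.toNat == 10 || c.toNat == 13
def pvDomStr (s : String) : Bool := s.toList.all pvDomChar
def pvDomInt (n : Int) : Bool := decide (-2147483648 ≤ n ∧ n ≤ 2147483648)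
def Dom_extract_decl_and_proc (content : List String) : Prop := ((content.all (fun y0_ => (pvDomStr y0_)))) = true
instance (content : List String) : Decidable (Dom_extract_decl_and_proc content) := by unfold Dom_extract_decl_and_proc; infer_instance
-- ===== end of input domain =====

-- B replaces A's two-phase index-and-slice algorithm by a single left-to-right pass
-- maintaining the current region and a seen flag; same return value, alternative decomposition.

-- ===== PORT A =====
-- the while-loop of A: consume the remaining generator items; while(next_proc_ind != 0)
def pvALoop (content : List String) (old : Int) : List Int → List (List String)
  | [] => []                       -- next(process_indexes, 0) = 0 → loop exits
  | n :: rest =>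
      if n ≠ 0 then PySem.List.slice content (some old) (some n) :: pvALoop content n rest
      else []

def extract_decl_and_proc (content : List String) : List String × List (List String) :=
  -- process_indexes: the generator's items in the order next() yields them
  let process_indexes := ((PySem.List.enumerate content 0).filter
      (fun p => PySem.Str.isIn "process" p.2)).map (·.1)
  let next_proc_ind := process_indexes.headD 0      -- next(process_indexes, 0)
  let globs := PySem.List.slice content none (some next_proc_ind)
  -- Step 0: old ← next; next ← next(gen, 0); then the while loop
  (globs, pvALoop content next_proc_ind process_indexes.tail)

-- ===== PORT B =====
-- one step of B's for-loop; state = (globs, processes, current, seen)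
def pvBStep (st : List String × List (List String) × List String × Bool) (line : String) :
    List String × List (List String) × List String × Bool :=
  if PySem.Str.isIn "process" line then
    if st.2.2.2 then (st.1, st.2.1 ++ [st.2.2.1], [line], true)
    else (st.2.2.1, st.2.1, [line], true)
  else (st.1, st.2.1, st.2.2.1 ++ [line], st.2.2.2)

def extract_decl_and_proc_alt (content : List String) : List String × List (List String) :=
  let st := content.foldl pvBStep ([], [], [], false)
  (st.1, st.2.1)

-- ===== PRECONDITION & SPEC =====
def Spec_extract_decl_and_proc (content : List String) (out : List String × List (List String)) : Prop := out = extract_decl_and_proc_alt content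
instance (content : List String) (out : List String × List (List String)) : Decidable (Spec_extract_decl_and_proc content out) := by unfold Spec_extract_decl_and_proc; infer_instance

-- ===== CLAIM (what is proved, stated in full; the proofs are below) =====
def Claim_equal_extract_decl_and_proc : Prop := ∀ (content : List String), Dom_extract_decl_and_proc content → Spec_extract_decl_and_proc content (extract_decl_and_proc content)

-- ===== LEMMAS AND PROOFS =====

-- is this a "process" line?
def pvProc (s : String) : Bool := PySem.Str.isIn "process" s

-- the index list A's generator yields, starting at offset k
def pvIdxsFrom (k : Int) (content : List String) : List Int :=
  ((PySem.List.enumerate content k).filter (fun p => PySem.Str.isIn "process" p.2)).map (·.1)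

-- B's true-phase splitter: regions completed so far and the in-progress region
def pvSplit (cur : List String) : List String → List (List String) × List String
  | [] => ([], cur)
  | y :: ys =>
      if pvProc y then
        let r := pvSplit [y] ys
        (cur :: r.1, r.2)
      else pvSplit (cur ++ [y]) ys

-- the common specification both ports are reduced to
def pvSpec (content : List String) : List String × List (List String) :=
  match content.dropWhile (fun s => !pvProc s) with
  | [] => ([], [])
  | y :: rest => (content.takeWhile (fun s => !pvProc s), (pvSplit [y] rest).1)

lemma pvIdxsFrom_nil (k : Int) : pvIdxsFrom k [] = [] := rfl

lemma pvIdxsFrom_cons (k : Int) (x : String) (xs : List String) :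
    pvIdxsFrom k (x :: xs) =
      if pvProc x then k :: pvIdxsFrom (k + 1) xs else pvIdxsFrom (k + 1) xs := by
  simp only [pvIdxsFrom, pvProc, PySem.List.enumerate_cons, List.filter_cons]
  by_cases h : PySem.Str.isIn "process" x <;> simp only [h] <;> simp

lemma pvIdxsFrom_shift (xs : List String) :
    ∀ k : Int, pvIdxsFrom (k + 1) xs = (pvIdxsFrom k xs).map (· + 1) := by
  induction xs with
  | nil => intro k; rfl
  | cons x xs ih =>
      intro k
      rw [pvIdxsFrom_cons, pvIdxsFrom_cons]
      by_cases h : pvProc x <;> simp [h, ih]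

lemma pvIdxsFrom_one (xs : List String) :
    pvIdxsFrom 1 xs = (pvIdxsFrom 0 xs).map (· + 1) := by
  have h := pvIdxsFrom_shift xs 0
  simpa using h

lemma pvIdxsFrom_nonneg (xs : List String) :
    ∀ k : Int, 0 ≤ k → ∀ i ∈ pvIdxsFrom k xs, 0 ≤ i := by
  induction xs with
  | nil => intro k _ i hi; simp [pvIdxsFrom_nil] at hi
  | cons x xs ih =>
      intro k hk i hi
      rw [pvIdxsFrom_cons] at hi
      by_cases h : pvProc x
      · simp [h] at hi
        rcases hi with rfl | hi
        · exact hk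
        · exact ih (k + 1) (by omega) i hi
      · simp [h] at hi
        exact ih (k + 1) (by omega) i hi

lemma pvIdxsFrom_eq_nil_iff (xs : List String) (k : Int) :
    pvIdxsFrom k xs = [] ↔ ∀ s ∈ xs, pvProc s = false := by
  induction xs generalizing k with
  | nil => simp [pvIdxsFrom_nil]
  | cons x xs ih =>
      rw [pvIdxsFrom_cons]
      by_cases h : pvProc x <;> simp [h, ih]

lemma pvDropWhile_eq_nil_iff (xs : List String) :
    xs.dropWhile (fun s => !pvProc s) = [] ↔ ∀ s ∈ xs, pvProc s = false := by
  rw [List.dropWhile_eq_nil_iff]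
  simp

-- slice shift: dropping one cons shifts both nonnegative bounds by one
lemma pvSlice_shift (x : String) (xs : List String) (a b : Int) (ha : 0 ≤ a) (hb : 0 ≤ b) :
    PySem.List.slice (x :: xs) (some (a + 1)) (some (b + 1)) =
      PySem.List.slice xs (some a) (some b) := by
  rw [PySem.List.slice_toNat _ (by omega : (0:Int) ≤ a + 1) (by omega : (0:Int) ≤ b + 1),
      PySem.List.slice_toNat _ ha hb]
  have h1 : (a + 1).toNat = a.toNat + 1 := by omega
  have h2 : (b + 1).toNat = b.toNat + 1 := by omega
  simp [h1, h2]

lemma pvSlice_to_cons (x : String) (xs : List String) (b : Int) (hb : 0 ≤ b) :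
    PySem.List.slice (x :: xs) none (some (b + 1)) = x :: PySem.List.slice xs none (some b) := by
  rw [PySem.List.slice_to _ (by omega : (0:Int) ≤ b + 1), PySem.List.slice_to _ hb]
  have h : (b + 1).toNat = b.toNat + 1 := by omega
  simp [h]

lemma pvALoop_eq_zip (content : List String) :
    ∀ (rest : List Int) (old : Int), (∀ x ∈ rest, x ≠ 0) →
      pvALoop content old rest =
        ((old :: rest).zip rest).map
          (fun p => PySem.List.slice content (some p.1) (some p.2)) := by
  intro rest
  induction rest with
  | nil => intro old _; rfl
  | cons n rs ih =>
      intro old h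
      have hn : n ≠ 0 := h n (by simp)
      simp only [pvALoop, if_pos hn, List.zip_cons_cons, List.map_cons]
      exact congrArg _ (ih n (fun x hx => h x (by simp [hx])))

-- A's result in closed zip-slice form
def pvZS (content : List String) : List String × List (List String) :=
  let idxs := pvIdxsFrom 0 content
  (PySem.List.slice content none (some (idxs.headD 0)),
    (idxs.zip idxs.tail).map (fun p => PySem.List.slice content (some p.1) (some p.2)))

lemma pvIdxs_pairwise (content : List String) : (pvIdxsFrom 0 content).Pairwise (· < ·) := by
  have h := PySem.List.pairwise_lt_enumerate content (0 : Int)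
  exact (h.filter _).map _ (fun a b hab => hab)

lemma extract_eq_pvZS (content : List String) : extract_decl_and_proc content = pvZS content := by
  unfold extract_decl_and_proc pvZS
  have hidxs : ((PySem.List.enumerate content 0).filter
      (fun p => PySem.Str.isIn "process" p.2)).map (·.1) = pvIdxsFrom 0 content := rfl
  simp only [hidxs]
  cases h : pvIdxsFrom 0 content with
  | nil => rfl
  | cons i t =>
      have hp := pvIdxs_pairwise content
      have hn := pvIdxsFrom_nonneg content 0 le_rfl
      rw [h] at hp hn
      have hi : (0 : Int) ≤ i := hn i (by simp)
      have ht : ∀ x ∈ t, x ≠ 0 := by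
        intro x hx
        have := (List.pairwise_cons.mp hp).1 x hx
        omega
      simp only [List.headD_cons, List.tail_cons]
      exact congrArg _ (pvALoop_eq_zip content t i ht)

-- one unfolding of pvSplit's first component along the first "process" line
lemma pvSplit_fst (l : List String) :
    ∀ cur, (pvSplit cur l).1 =
      match l.dropWhile (fun s => !pvProc s) with
      | [] => []
      | y :: rest => (cur ++ l.takeWhile (fun s => !pvProc s)) :: (pvSplit [y] rest).1 := by
  induction l with
  | nil => intro cur; rfl
  | cons y ys ih =>
      intro cur
      by_cases h : pvProc y
      · simp [pvSplit, h]
      · simp only [pvSplit, h, Bool.false_eq_true, if_false, ih (cur ++ [y]),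
          List.dropWhile_cons, List.takeWhile_cons]
        simp

-- zip of a successor-shifted list with its tail
lemma pvZip_shift (l : List Int) :
    (l.map (· + 1)).zip (l.map (· + 1)).tail =
      (l.zip l.tail).map (fun p : Int × Int => (p.1 + 1, p.2 + 1)) := by
  cases l with
  | nil => rfl
  | cons a t =>
      simp only [List.map_cons, List.tail_cons]
      rw [show (t.map (· + 1)) = t.map (· + 1) from rfl]
      induction t generalizing a with
      | nil => rfl
      | cons b t ih => simp_all

-- A's closed form equals the common spec
lemma pvZS_eq_pvSpec (content : List String) : pvZS content = pvSpec content := by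
  induction content with
  | nil => rfl
  | cons x xs ih =>
      have hnn := pvIdxsFrom_nonneg xs 0 le_rfl
      unfold pvZS pvSpec
      unfold pvZS pvSpec at ih
      rw [pvIdxsFrom_cons]
      simp only [zero_add, pvIdxsFrom_one, List.dropWhile_cons, List.takeWhile_cons]
      cases h : pvIdxsFrom 0 xs with
      | nil =>
          have hdw : xs.dropWhile (fun s => !pvProc s) = [] :=
            (pvDropWhile_eq_nil_iff xs).mpr ((pvIdxsFrom_eq_nil_iff xs 0).mp h)
          by_cases hx : pvProc x <;>
            simp [hx, hdw, pvSplit_fst, PySem.List.slice_to _ le_rfl]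
      | cons i t =>
          have hi : (0 : Int) ≤ i := by
            have := hnn i; rw [h] at this; exact this (by simp)
          have hne : xs.dropWhile (fun s => !pvProc s) ≠ [] := by
            intro hdw
            have := (pvIdxsFrom_eq_nil_iff xs 0).mpr ((pvDropWhile_eq_nil_iff xs).mp hdw)
            simp [h] at this
          obtain ⟨y, rest, hdw⟩ : ∃ y rest, xs.dropWhile (fun s => !pvProc s) = y :: rest := by
            cases hd : xs.dropWhile (fun s => !pvProc s) with
            | nil => exact absurd hd hne
            | cons y rest => exact ⟨y, rest, rfl⟩
          rw [h, hdw] at ih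
          simp only [List.headD_cons, Prod.mk.injEq] at ih
          obtain ⟨ihg, ihp⟩ := ih
          have hshift : List.map (fun p => PySem.List.slice (x :: xs) (some p.1) (some p.2))
              (((i :: t).map (· + 1)).zip ((i :: t).map (· + 1)).tail) = (pvSplit [y] rest).1 := by
            rw [pvZip_shift (i :: t), List.map_map, ← ihp]
            apply List.map_congr_left
            intro p hp
            obtain ⟨hp1, hp2⟩ := List.of_mem_zip hp
            have h1 : 0 ≤ p.1 := by
              have := hnn p.1; rw [h] at this; exact this hp1
            have h2 : 0 ≤ p.2 := by
              have := hnn p.2; rw [h] at this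
              exact this (List.mem_of_mem_tail hp2)
            exact pvSlice_shift x xs p.1 p.2 h1 h2
          by_cases hx : pvProc x
          · -- the head is itself a process line: new region (x :: takeWhile xs)
            simp only [hx, if_pos, Bool.not_true, Bool.false_eq_true, if_false]
            rw [pvSplit_fst, hdw]
            simp only [List.map_cons, List.zip_cons_cons, List.tail_cons, List.headD_cons,
              Prod.mk.injEq]
            refine ⟨?_, ?_⟩
            · rw [PySem.List.slice_to _ le_rfl]
              rfl
            · rw [List.cons.injEq]
              refine ⟨?_, ?_⟩
              · rw [PySem.List.slice_zero_start, pvSlice_to_cons x xs i hi, ihg]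
                rfl
              · exact hshift
          · -- the head line joins the globals prefix
            simp only [hx, Bool.false_eq_true, if_false, Bool.not_false, if_true, hdw,
              List.map_cons, List.headD_cons, Prod.mk.injEq]
            refine ⟨?_, ?_⟩
            · rw [pvSlice_to_cons x xs i hi, ihg]
            · rw [← hshift]; simp

-- B's fold in the seen = true phase
lemma pvFold_true (l : List String) :
    ∀ (g : List String) (ps : List (List String)) (cur : List String),
      l.foldl pvBStep (g, ps, cur, true) =
        (g, ps ++ (pvSplit cur l).1, (pvSplit cur l).2, true) := by
  induction l with
  | nil => intro g ps cur; simp [pvSplit]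
  | cons y ys ih =>
      intro g ps cur
      rw [List.foldl_cons]
      by_cases h : pvProc y
      · have h' : PySem.Str.isIn "process" y = true := h
        have hstep : pvBStep (g, ps, cur, true) y = (g, ps ++ [cur], [y], true) := by
          unfold pvBStep; rw [if_pos h']
          try rfl
        rw [hstep, ih]
        simp [pvSplit, h]
      · have h' : ¬ PySem.Str.isIn "process" y = true := h
        have hstep : pvBStep (g, ps, cur, true) y = (g, ps, cur ++ [y], true) := by
          unfold pvBStep; rw [if_neg h']
          try rfl
        rw [hstep, ih]
        simp [pvSplit, h]

-- B's fold in the seen = false phase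
lemma pvFold_false (l : List String) :
    ∀ (ps : List (List String)) (cur : List String),
      l.foldl pvBStep (([] : List String), ps, cur, false) =
        match l.dropWhile (fun s => !pvProc s) with
        | [] => ([], ps, cur ++ l, false)
        | y :: rest => rest.foldl pvBStep (cur ++ l.takeWhile (fun s => !pvProc s), ps, [y], true) := by
  induction l with
  | nil => intro ps cur; simp
  | cons y ys ih =>
      intro ps cur
      rw [List.foldl_cons]
      by_cases h : pvProc y
      · have h' : PySem.Str.isIn "process" y = true := h
        have hstep : pvBStep (([] : List String), ps, cur, false) y = (cur, ps, [y], true) := by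
          unfold pvBStep; rw [if_pos h']
          try rfl
        rw [hstep]
        simp only [List.dropWhile_cons, List.takeWhile_cons, h, Bool.not_true,
          Bool.false_eq_true, if_false]
        simp
      · have h' : ¬ PySem.Str.isIn "process" y = true := h
        have hstep : pvBStep (([] : List String), ps, cur, false) y = ([], ps, cur ++ [y], false) := by
          unfold pvBStep; rw [if_neg h']
          try rfl
        rw [hstep, ih]
        have hb : pvProc y = false := by revert h; cases pvProc y <;> simp
        simp only [List.dropWhile_cons, List.takeWhile_cons, hb, Bool.not_false, if_true]
        cases ys.dropWhile (fun s => !pvProc s) <;> simp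

-- B equals the common spec
lemma alt_eq_pvSpec (content : List String) : extract_decl_and_proc_alt content = pvSpec content := by
  unfold extract_decl_and_proc_alt pvSpec
  simp only [pvFold_false]
  cases h : content.dropWhile (fun s => !pvProc s) with
  | nil => simp
  | cons y rest => simp [pvFold_true]

-- ===== VERDICT (by name: the statement is the Claim_ definition above) =====
theorem extract_decl_and_proc_spec : Claim_equal_extract_decl_and_proc := by
  intro content _
  unfold Spec_extract_decl_and_proc
  rw [extract_eq_pvZS, pvZS_eq_pvSpec, alt_eq_pvSpec]
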